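-- pv_equiv track=rewrite | github.com/VisImage/ultralytics | fencer_heuristics.py | clean_merged_pose
-- ===== SOURCE A (Python) =====
-- from collections import defaultdict
--
-- def clean_merged_pose(pose_dict):
--
--     pose_dict_temp1 = pose_dict.copy()
--     merged_list_final = []
--     merged_dict = defaultdict()
--     while len(pose_dict_temp1) > 0:
--         # take the first element in the dictionary
--         # and compare
--         key1  = list(pose_dict_temp1.keys())[0]
--         item1 = pose_dict_temp1[key1]
--         merged_list_id = item1[0]
--         merged_list_imageId = item1[1]
--         pose_dict_temp1.pop(key1)
--         pose_dict_temp = pose_dict_temp1.copy()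
--         for pose_id in pose_dict_temp1:
--             item = pose_dict_temp1[pose_id]
--             common_list = set(item[0]).intersection(item1[0])
--             if len (common_list) > 0:
--                 pose_dict_temp.pop(pose_id)
--                 merged_list_id = merged_list_id + item[0]
--                 merged_list_imageId = merged_list_imageId + item[1]
--         merged_list_id = list(dict.fromkeys(merged_list_id))
--         merged_list_final.append([merged_list_id, merged_list_imageId])
--         #merged_dict[merged_list_id] = merged_list_imageId
--         pose_dict_temp1 = pose_dict_temp
--
--     return merged_list_final
-- ===== SOURCE B (Python) =====
-- def clean_merged_pose(pose_dict):
--     items = list(pose_dict.items())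
--     pos = {k: i for i, (k, _) in enumerate(items)}
--     # inverted index: id -> keys of the entries whose id-list contains it (in dict order)
--     index = {}
--     for k, v in items:
--         for i in set(v[0]):
--             index.setdefault(i, []).append(k)
--     removed = set()
--     out = []
--     for k, v in items:
--         if k in removed:
--             continue
--         removed.add(k)
--         cand_keys = {k2 for i in set(v[0]) for k2 in index.get(i, []) if k2 not in removed}
--         merged_ids = v[0]
--         merged_imgs = v[1]
--         for k2 in sorted(cand_keys, key=pos.__getitem__):
--             removed.add(k2)
--             v2 = pose_dict[k2]
--             merged_ids = merged_ids + v2[0]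
--             merged_imgs = merged_imgs + v2[1]
--         out.append([list(dict.fromkeys(merged_ids)), merged_imgs])
--     return out
-- ===== Notes on version B (the rewrite author's own statement) =====
-- stated objective: faster
-- what changed: Instead of rescanning the whole remaining dict for every seed, B builds an inverted index id->keys once and, per seed, fetches only the seed's direct neighbours from the index (plus a removed-set and a position sort to keep the original merge order).
import Mathlib
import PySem

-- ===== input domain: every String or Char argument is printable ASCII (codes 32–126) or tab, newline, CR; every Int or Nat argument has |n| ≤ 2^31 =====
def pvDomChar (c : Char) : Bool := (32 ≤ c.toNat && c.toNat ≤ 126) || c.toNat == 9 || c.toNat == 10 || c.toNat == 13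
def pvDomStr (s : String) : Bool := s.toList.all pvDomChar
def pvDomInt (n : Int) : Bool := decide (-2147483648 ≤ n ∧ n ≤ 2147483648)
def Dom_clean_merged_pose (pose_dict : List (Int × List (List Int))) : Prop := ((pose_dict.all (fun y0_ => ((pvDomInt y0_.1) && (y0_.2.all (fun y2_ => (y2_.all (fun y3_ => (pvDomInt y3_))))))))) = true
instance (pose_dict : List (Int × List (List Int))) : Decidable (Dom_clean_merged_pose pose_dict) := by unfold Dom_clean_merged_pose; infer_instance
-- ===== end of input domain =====

-- B replaces A's rescan of the whole remaining dict per seed by an inverted index id → keys,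
-- fetching each seed's direct neighbours and sorting them by original position (objective: faster).

-- ===== PORT A =====
-- while-loop over the shrinking dict, fuel = initial number of entries (the loop removes ≥ 1 entry per pass)
def pvCleanLoopA (fuel : Nat) (d : PySem.Dict Int (List (List Int))) : List (List (List Int)) :=
  match fuel with
  | 0 => []
  | fuel + 1 =>
    match d.items with
    | [] => []
    | (key1, item1) :: _ =>
      let l0 := PySem.List.pyGetD item1 0 []        -- item1[0]
      let l1 := PySem.List.pyGetD item1 1 []        -- item1[1]
      let d1 := d.erase key1                        -- pose_dict_temp1.pop(key1)
      let st := d1.items.foldl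
        (fun (s : PySem.Dict Int (List (List Int)) × List Int × List Int) p =>
          if 0 < PySem.Set.len (PySem.Set.inter (PySem.Set.ofList (PySem.List.pyGetD p.2 0 [])) l0)
          then (s.1.erase p.1,
                s.2.1 ++ PySem.List.pyGetD p.2 0 [],
                s.2.2 ++ PySem.List.pyGetD p.2 1 [])
          else s)
        (d1, l0, l1)
      [PySem.List.dedup st.2.1, st.2.2] :: pvCleanLoopA fuel st.1

def clean_merged_pose (pose_dict : List (Int × List (List Int))) : List (List (List Int)) :=
  pvCleanLoopA pose_dict.length (PySem.Dict.ofList pose_dict)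

-- ===== PORT B =====
def pvCleanLoopB (d0 : PySem.Dict Int (List (List Int))) (index : PySem.Dict Int (List Int))
    (pos : PySem.Dict Int Int) :
    List (Int × List (List Int)) → PySem.Set Int → List (List (List Int))
  | [], _ => []
  | (k, v) :: rest, removed =>
    if PySem.Set.contains removed k then pvCleanLoopB d0 index pos rest removed
    else
      let removed1 := PySem.Set.add removed k
      let cand := PySem.List.sorted
        (PySem.Set.ofList
          (((PySem.Set.ofList (PySem.List.pyGetD v 0 [])).flatMap (fun i => index.getD i [])).filter
            (fun k2 => !PySem.Set.contains removed1 k2)))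
        (fun k2 => pos.getD k2 0)
      let st := cand.foldl
        (fun (s : PySem.Set Int × List Int × List Int) k2 =>
          (PySem.Set.add s.1 k2,
           s.2.1 ++ PySem.List.pyGetD (d0.getD k2 []) 0 [],
           s.2.2 ++ PySem.List.pyGetD (d0.getD k2 []) 1 []))
        (removed1, PySem.List.pyGetD v 0 [], PySem.List.pyGetD v 1 [])
      [PySem.List.dedup st.2.1, st.2.2] :: pvCleanLoopB d0 index pos rest st.1

def clean_merged_pose_alt (pose_dict : List (Int × List (List Int))) : List (List (List Int)) :=
  let d0 := PySem.Dict.ofList pose_dict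
  let items := d0.items
  let pos := (PySem.List.enumerate items).foldl
    (fun d q => d.insert q.2.1 q.1) PySem.Dict.empty
  let index := items.foldl
    (fun ix p =>
      (PySem.Set.ofList (PySem.List.pyGetD p.2 0 [])).foldl
        (fun ix i => ix.modify i [] (fun l => l ++ [p.1])) ix)
    PySem.Dict.empty
  pvCleanLoopB d0 index pos items PySem.Set.empty

-- ===== PRECONDITION & SPEC =====
-- Pre_: every value of the dict has at least 2 elements; on a shorter value Python A raises IndexError
-- when it reads the id list or the image-id list of an entry.
def Pre_clean_merged_pose (pose_dict : List (Int × List (List Int))) : Prop :=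
  ∀ p ∈ (PySem.Dict.ofList pose_dict).items, 2 ≤ p.2.length
instance (pose_dict : List (Int × List (List Int))) : Decidable (Pre_clean_merged_pose pose_dict) := by unfold Pre_clean_merged_pose; infer_instance
def pvWitness_clean_merged_pose : (List (Int × List (List Int))) :=
  [(1, [[7, 8], [10]]), (2, [[9], [20]]), (3, [[8], [30]])]
def Spec_clean_merged_pose (pose_dict : List (Int × List (List Int))) (out : List (List (List Int))) : Prop := out = clean_merged_pose_alt pose_dict
instance (pose_dict : List (Int × List (List Int))) (out : List (List (List Int))) : Decidable (Spec_clean_merged_pose pose_dict out) := by unfold Spec_clean_merged_pose; infer_instance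

-- ===== CLAIM (what is proved, stated in full; the proofs are below) =====
def Claim_equal_clean_merged_pose : Prop := ∀ (pose_dict : List (Int × List (List Int))), Dom_clean_merged_pose pose_dict → Pre_clean_merged_pose pose_dict → Spec_clean_merged_pose pose_dict (clean_merged_pose pose_dict)

-- ===== LEMMAS AND PROOFS =====

-- abbreviations used only by the proofs
def pvG0 (p : Int × List (List Int)) : List Int := PySem.List.pyGetD p.2 0 []
def pvG1 (p : Int × List (List Int)) : List Int := PySem.List.pyGetD p.2 1 []
def pvHit (l0 : List Int) (p : Int × List (List Int)) : Bool :=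
  0 < PySem.Set.len (PySem.Set.inter (PySem.Set.ofList (pvG0 p)) l0)
def pvRem (s : List (Int × List (List Int))) (R : PySem.Set Int) : List (Int × List (List Int)) :=
  s.filter (fun p => !PySem.Set.contains R p.1)
def pvPosOf (items : List (Int × List (List Int))) : PySem.Dict Int Int :=
  (PySem.List.enumerate items).foldl (fun d q => d.insert q.2.1 q.1) PySem.Dict.empty
def pvIndexOf (items : List (Int × List (List Int))) : PySem.Dict Int (List Int) :=
  items.foldl
    (fun ix p =>
      (PySem.Set.ofList (PySem.List.pyGetD p.2 0 [])).foldl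
        (fun ix i => ix.modify i [] (fun l => l ++ [p.1])) ix)
    PySem.Dict.empty

theorem pv_hit_iff (l0 : List Int) (p : Int × List (List Int)) :
    pvHit l0 p = true ↔ ∃ x ∈ pvG0 p, x ∈ l0 := by
  simp only [pvHit, PySem.Set.len, decide_eq_true_eq]
  rw [Int.natCast_pos, List.length_pos_iff_exists_mem]
  constructor
  · rintro ⟨x, hx⟩
    rw [PySem.Set.mem_inter] at hx
    exact ⟨x, by simpa using (PySem.Set.mem_ofList _ _).1 hx.1, hx.2⟩
  · rintro ⟨x, hx, h2⟩
    exact ⟨x, (PySem.Set.mem_inter _ _ _).2 ⟨(PySem.Set.mem_ofList _ _).2 hx, h2⟩⟩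

theorem pv_stepA (l : List (Int × List (List Int))) (l0 : List Int)
    (e : PySem.Dict Int (List (List Int))) (a b : List Int) :
    l.foldl
      (fun (s : PySem.Dict Int (List (List Int)) × List Int × List Int) p =>
        if 0 < PySem.Set.len (PySem.Set.inter (PySem.Set.ofList (PySem.List.pyGetD p.2 0 [])) l0)
        then (s.1.erase p.1, s.2.1 ++ PySem.List.pyGetD p.2 0 [], s.2.2 ++ PySem.List.pyGetD p.2 1 [])
        else s) (e, a, b) =
      (((l.filter (pvHit l0)).map (fun p => p.1)).foldl (fun d k => d.erase k) e,
       a ++ (l.filter (pvHit l0)).flatMap pvG0,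
       b ++ (l.filter (pvHit l0)).flatMap pvG1) := by
  induction l generalizing e a b with
  | nil => simp
  | cons p tl ih =>
    simp only [List.foldl_cons, List.filter_cons]
    by_cases h : (0:Int) < PySem.Set.len (PySem.Set.inter (PySem.Set.ofList (PySem.List.pyGetD p.2 0 [])) l0)
    · have hb : pvHit l0 p = true := by simpa [pvHit, pvG0] using h
      rw [if_pos h, ih, hb]
      simp [pvG0, pvG1]
    · have hb : pvHit l0 p = false := by simpa [pvHit, pvG0] using h
      rw [if_neg h, ih, hb]
      simp

theorem pv_stepB (cand : List Int) (d0 : PySem.Dict Int (List (List Int)))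
    (R : PySem.Set Int) (a b : List Int) :
    cand.foldl
      (fun (s : PySem.Set Int × List Int × List Int) k2 =>
        (PySem.Set.add s.1 k2,
         s.2.1 ++ PySem.List.pyGetD (d0.getD k2 []) 0 [],
         s.2.2 ++ PySem.List.pyGetD (d0.getD k2 []) 1 [])) (R, a, b) =
      (PySem.Set.update R cand,
       a ++ cand.flatMap (fun k2 => PySem.List.pyGetD (d0.getD k2 []) 0 []),
       b ++ cand.flatMap (fun k2 => PySem.List.pyGetD (d0.getD k2 []) 1 [])) := by
  induction cand generalizing R a b with
  | nil => simp [PySem.Set.update]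
  | cons k tl ih =>
    simp only [List.foldl_cons, List.flatMap_cons]
    rw [ih]
    simp [PySem.Set.update]

theorem pv_erase_fold (ks : List Int) (d : PySem.Dict Int (List (List Int))) :
    (ks.foldl (fun e k => e.erase k) d).items =
      d.items.filter (fun q => !ks.contains q.1) := by
  induction ks generalizing d with
  | nil => simp
  | cons k tl ih =>
    rw [List.foldl_cons, ih]
    show (PySem.Dict.erase d k).items.filter _ = _
    simp only [PySem.Dict.erase, List.filter_filter]
    apply List.filter_congr
    intro q _
    simp only [List.contains_cons]
    cases hq : (q.1 == k) <;> cases htl : tl.contains q.1 <;> simp_all [BEq.comm]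

theorem pv_filter_one (l : List Int) (i : Int) (hnd : l.Nodup) :
    l.filter (fun j => j == i) = if i ∈ l then [i] else [] := by
  induction l with
  | nil => simp
  | cons x t iht =>
    rcases List.nodup_cons.1 hnd with ⟨hx, ht⟩
    rw [List.filter_cons, iht ht]
    by_cases hxi : x = i
    · subst hxi
      simp [hx]
    · have hb : (x == i) = false := beq_eq_false_iff_ne.2 hxi
      have hix : ¬ i = x := fun h => hxi h.symm
      simp [hb, hix]

theorem pv_filter_nodup_beq (xs : List Int) (i : Int) :
    (PySem.Set.ofList xs).filter (fun j => j == i) = if xs.contains i then [i] else [] := by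
  rw [pv_filter_one _ _ (PySem.Set.nodup_ofList xs)]
  by_cases h : i ∈ xs
  · rw [if_pos ((PySem.Set.mem_ofList _ _).2 h), if_pos (by simpa using h)]
  · rw [if_neg (fun hc => h ((PySem.Set.mem_ofList _ _).1 hc)), if_neg (by simpa using h)]

theorem pv_flatMap_if_singleton (c : Int × List (List Int) → Bool)
    (items : List (Int × List (List Int))) :
    (items.flatMap (fun p => if c p then [p.1] else [])) =
      (items.filter c).map (fun p => p.1) := by
  induction items with
  | nil => simp
  | cons p tl ih =>
    by_cases h : c p <;> simp [h, ih]

theorem pv_index_getD (items : List (Int × List (List Int))) (i : Int) :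
    (pvIndexOf items).getD i [] =
      (items.filter (fun p => (pvG0 p).contains i)).map (fun p => p.1) := by
  have h1 : pvIndexOf items =
      (items.flatMap (fun p => (PySem.Set.ofList (PySem.List.pyGetD p.2 0 [])).map
        (fun j => (j, p.1)))).foldl
        (fun d q => d.modify q.1 [] (fun l => l ++ [q.2])) PySem.Dict.empty := by
    rw [List.foldl_flatMap]
    unfold pvIndexOf
    congr 1
    funext ix p
    rw [List.foldl_map]
  rw [h1, PySem.Dict.getD_foldl_modify_append]
  simp only [PySem.Dict.getD_empty, List.nil_append]
  rw [List.filter_flatMap, List.map_flatMap]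
  rw [← pv_flatMap_if_singleton (fun p => (pvG0 p).contains i) items]
  congr 1
  funext p
  rw [List.filter_map]
  have : ((fun p => p.1 == i) ∘ fun j => (j, p.1)) = fun j => j == i := rfl
  rw [this, pv_filter_nodup_beq]
  by_cases h : i ∈ PySem.List.pyGetD p.2 0 [] <;> simp [pvG0, h]

theorem pv_pos_untouched (l : List (Int × List (List Int))) (k : Int)
    (h : ∀ p ∈ l, p.1 ≠ k) (s : Int) (d : PySem.Dict Int Int) :
    ((PySem.List.enumerate l s).foldl (fun d q => d.insert q.2.1 q.1) d).getD k 0 = d.getD k 0 := by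
  induction l generalizing s d with
  | nil => simp [PySem.List.enumerate]
  | cons p tl ih =>
    rw [PySem.List.enumerate_cons, List.foldl_cons]
    rw [ih (fun q hq => h q (List.mem_cons_of_mem _ hq))]
    exact PySem.Dict.getD_insert_of_ne d _ _ (fun hk => h p (List.mem_cons_self) hk.symm)

theorem pv_pos_core (l : List (Int × List (List Int)))
    (hnd : (l.map (fun p => p.1)).Nodup) (s : Int) (d : PySem.Dict Int Int)
    (j : Nat) (hj : j < l.length) :
    ((PySem.List.enumerate l s).foldl (fun d q => d.insert q.2.1 q.1) d).getD (l[j].1) 0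
      = s + j := by
  induction l generalizing s d j with
  | nil => simp at hj
  | cons p tl ih =>
    rw [PySem.List.enumerate_cons, List.foldl_cons]
    have hnd' : (p.1 :: tl.map (fun p => p.1)).Nodup := by simpa using hnd
    rcases List.nodup_cons.1 hnd' with ⟨hp, htl⟩
    match j with
    | 0 =>
      have hne : ∀ q ∈ tl, q.1 ≠ p.1 := by
        intro q hq hqe
        exact hp (hqe ▸ List.mem_map_of_mem hq)
      simp only [List.getElem_cons_zero]
      rw [pv_pos_untouched tl p.1 hne, PySem.Dict.getD_insert_self]
      simp
    | j + 1 =>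
      have := ih htl (s + 1) (d.insert p.1 s) j (by simpa using hj)
      simp only [List.getElem_cons_succ]
      rw [this]
      push_cast
      ring

theorem pv_pos_getD (items : List (Int × List (List Int)))
    (hnd : (items.map (fun p => p.1)).Nodup) (j : Nat) (hj : j < items.length) :
    (pvPosOf items).getD (items[j].1) 0 = (j : Int) := by
  have := pv_pos_core items hnd 0 PySem.Dict.empty j hj
  simpa [pvPosOf] using this

theorem pv_pos_pairwise (items sub : List (Int × List (List Int)))
    (hnd : (items.map (fun p => p.1)).Nodup) (hsub : sub.Sublist items) :
    (sub.map (fun p => p.1)).Pairwise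
      (fun a b => (pvPosOf items).getD a 0 < (pvPosOf items).getD b 0) := by
  have hall : (items.map (fun p => p.1)).Pairwise
      (fun a b => (pvPosOf items).getD a 0 < (pvPosOf items).getD b 0) := by
    rw [List.pairwise_iff_getElem]
    intro i j hi hj hij
    simp only [List.getElem_map]
    rw [pv_pos_getD items hnd i (by simpa using hi), pv_pos_getD items hnd j (by simpa using hj)]
    exact_mod_cast hij
  exact hall.sublist (hsub.map _)

theorem pv_sublist_keys_nodup (items sub : List (Int × List (List Int)))
    (hnd : (items.map (fun p => p.1)).Nodup) (hsub : sub.Sublist items) :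
    (sub.map (fun p => p.1)).Nodup :=
  (hsub.map _).nodup hnd

theorem pv_cand (items pre rest : List (Int × List (List Int))) (k : Int)
    (v : List (List Int)) (R : PySem.Set Int)
    (hnd : (items.map (fun p => p.1)).Nodup)
    (hpre : items = pre ++ (k, v) :: rest)
    (hcov : ∀ p ∈ pre, PySem.Set.contains R p.1 = true) :
    PySem.List.sorted
      (PySem.Set.ofList
        (((PySem.Set.ofList (PySem.List.pyGetD v 0 [])).flatMap
            (fun i => (pvIndexOf items).getD i [])).filter
          (fun k2 => !PySem.Set.contains (PySem.Set.add R k) k2)))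
      (fun k2 => (pvPosOf items).getD k2 0) =
    (rest.filter (fun q =>
        !PySem.Set.contains (PySem.Set.add R k) q.1 && pvHit (PySem.List.pyGetD v 0 []) q)).map
      (fun p => p.1) := by
  have hrest_sub : rest.Sublist items := by
    rw [hpre]
    exact ((List.sublist_cons_self _ _).trans (List.sublist_append_right _ _))
  have hhits_sub : (rest.filter (fun q =>
      !PySem.Set.contains (PySem.Set.add R k) q.1 && pvHit (PySem.List.pyGetD v 0 []) q)).Sublist items :=
    (List.filter_sublist).trans hrest_sub
  apply PySem.List.sorted_eq_of_perm_of_pairwise_lt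
  · -- permutation
    rw [List.perm_ext_iff_of_nodup
      (pv_sublist_keys_nodup items _ hnd hhits_sub) (PySem.Set.nodup_ofList _)]
    intro a
    constructor
    · rintro ha
      rw [List.mem_map] at ha
      obtain ⟨q, hq, rfl⟩ := ha
      rw [List.mem_filter] at hq
      obtain ⟨hqr, hqc⟩ := hq
      rw [Bool.and_eq_true] at hqc
      obtain ⟨hnR1, hhit⟩ := hqc
      rw [pv_hit_iff] at hhit
      obtain ⟨x, hx0, hxl⟩ := hhit
      rw [PySem.Set.mem_ofList, List.mem_filter]
      refine ⟨?_, hnR1⟩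
      rw [List.mem_flatMap]
      refine ⟨x, (PySem.Set.mem_ofList _ _).2 hxl, ?_⟩
      rw [pv_index_getD, List.mem_map]
      refine ⟨q, ?_, rfl⟩
      rw [List.mem_filter]
      exact ⟨hrest_sub.mem hqr, by simpa using hx0⟩
    · intro ha
      rw [PySem.Set.mem_ofList, List.mem_filter] at ha
      obtain ⟨hbig, hnR1⟩ := ha
      rw [List.mem_flatMap] at hbig
      obtain ⟨x, hxl0, hax⟩ := hbig
      rw [pv_index_getD, List.mem_map] at hax
      obtain ⟨q, hq, rfl⟩ := hax
      rw [List.mem_filter] at hq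
      obtain ⟨hqitems, hxq⟩ := hq
      -- q is in rest: not in pre (covered by R ⊆ R1), not the seed (k ∈ R1)
      have hqrest : q ∈ rest := by
        rw [hpre] at hqitems
        rcases List.mem_append.1 hqitems with hqp | hqc
        · exfalso
          have := hcov q hqp
          rw [PySem.Set.contains_iff] at this
          have : q.1 ∈ PySem.Set.add R k := (PySem.Set.mem_add _ _ _).2 (Or.inl this)
          rw [Bool.not_eq_true', ← Bool.not_eq_true] at hnR1
          exact hnR1 ((PySem.Set.contains_iff _ _).2 this)
        · rcases List.mem_cons.1 hqc with hqe | hqr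
          · exfalso
            have hk1 : q.1 = k := by rw [hqe]
            have : q.1 ∈ PySem.Set.add R k := (PySem.Set.mem_add _ _ _).2 (Or.inr hk1)
            rw [Bool.not_eq_true', ← Bool.not_eq_true] at hnR1
            exact hnR1 ((PySem.Set.contains_iff _ _).2 this)
          · exact hqr
      rw [List.mem_map]
      refine ⟨q, ?_, rfl⟩
      rw [List.mem_filter, Bool.and_eq_true]
      refine ⟨hqrest, hnR1, ?_⟩
      rw [pv_hit_iff]
      exact ⟨x, by simpa using hxq, (PySem.Set.mem_ofList _ _).1 hxl0⟩
  · -- strictly increasing positions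
    exact pv_pos_pairwise items _ hnd hhits_sub

theorem pvA_unfold (f : Nat) (k : Int) (v : List (List Int)) (L : List (Int × List (List Int))) :
    pvCleanLoopA (f+1) (PySem.Dict.mk ((k,v)::L)) =
      (let l0 := PySem.List.pyGetD v 0 []
       let l1 := PySem.List.pyGetD v 1 []
       let d1 := (PySem.Dict.mk ((k,v)::L)).erase k
       let st := d1.items.foldl
        (fun (s : PySem.Dict Int (List (List Int)) × List Int × List Int) p =>
          if 0 < PySem.Set.len (PySem.Set.inter (PySem.Set.ofList (PySem.List.pyGetD p.2 0 [])) l0)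
          then (s.1.erase p.1,
                s.2.1 ++ PySem.List.pyGetD p.2 0 [],
                s.2.2 ++ PySem.List.pyGetD p.2 1 [])
          else s)
        (d1, l0, l1)
       [PySem.List.dedup st.2.1, st.2.2] :: pvCleanLoopA f st.1) := rfl

theorem pvB_unfold (d0 : PySem.Dict Int (List (List Int))) (ix : PySem.Dict Int (List Int))
    (ps : PySem.Dict Int Int) (k : Int) (v : List (List Int))
    (rest : List (Int × List (List Int))) (R : PySem.Set Int) :
    pvCleanLoopB d0 ix ps ((k,v)::rest) R =
      (if PySem.Set.contains R k then pvCleanLoopB d0 ix ps rest R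
       else
        let removed1 := PySem.Set.add R k
        let cand := PySem.List.sorted
          (PySem.Set.ofList
            (((PySem.Set.ofList (PySem.List.pyGetD v 0 [])).flatMap (fun i => ix.getD i [])).filter
              (fun k2 => !PySem.Set.contains removed1 k2)))
          (fun k2 => ps.getD k2 0)
        let st := cand.foldl
          (fun (s : PySem.Set Int × List Int × List Int) k2 =>
            (PySem.Set.add s.1 k2,
             s.2.1 ++ PySem.List.pyGetD (d0.getD k2 []) 0 [],
             s.2.2 ++ PySem.List.pyGetD (d0.getD k2 []) 1 []))
          (removed1, PySem.List.pyGetD v 0 [], PySem.List.pyGetD v 1 [])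
        [PySem.List.dedup st.2.1, st.2.2] :: pvCleanLoopB d0 ix ps rest st.1) := rfl

theorem pvA_step (f : Nat) (k : Int) (v : List (List Int)) (L : List (Int × List (List Int)))
    (hL : ∀ q ∈ L, q.1 ≠ k) (hndL : (L.map (fun p => p.1)).Nodup) :
    pvCleanLoopA (f+1) (PySem.Dict.mk ((k,v)::L)) =
      [PySem.List.dedup (PySem.List.pyGetD v 0 [] ++
          (L.filter (pvHit (PySem.List.pyGetD v 0 []))).flatMap pvG0),
       PySem.List.pyGetD v 1 [] ++
          (L.filter (pvHit (PySem.List.pyGetD v 0 []))).flatMap pvG1] ::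
      pvCleanLoopA f (PySem.Dict.mk (L.filter (fun q => !pvHit (PySem.List.pyGetD v 0 []) q))) := by
  rw [pvA_unfold]
  have hd1 : (PySem.Dict.mk ((k,v)::L)).erase k = PySem.Dict.mk L := by
    apply PySem.Dict.ext
    simp only [PySem.Dict.erase]
    rw [List.filter_cons]
    simp only [beq_self_eq_true, Bool.not_true, Bool.false_eq_true, if_false]
    exact List.filter_eq_self.2 (fun q hq => by simpa using hL q hq)
  simp only [hd1]
  rw [pv_stepA]
  simp only []
  congr 1
  apply congrArg
  have hd2 : ∀ (ks : List Int), ks.foldl (fun e k => e.erase k) (PySem.Dict.mk L)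
      = PySem.Dict.mk (L.filter (fun q => !ks.contains q.1)) := by
    intro ks
    apply PySem.Dict.ext
    rw [pv_erase_fold]
  rw [hd2]
  apply congrArg
  apply List.filter_congr
  intro q hq
  have : ((List.filter (pvHit (PySem.List.pyGetD v 0 [])) L).map (fun p => p.1)).contains q.1
      = pvHit (PySem.List.pyGetD v 0 []) q := by
    by_cases h : pvHit (PySem.List.pyGetD v 0 []) q
    · rw [h]
      rw [List.contains_eq_mem, decide_eq_true_iff, List.mem_map]
      exact ⟨q, List.mem_filter.2 ⟨hq, h⟩, rfl⟩
    · rw [Bool.not_eq_true] at h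
      rw [h]
      rw [List.contains_eq_mem, decide_eq_false_iff_not, List.mem_map]
      rintro ⟨p, hp, hpq⟩
      rw [List.mem_filter] at hp
      have := List.inj_on_of_nodup_map hndL hp.1 hq hpq
      rw [this] at hp
      rw [hp.2] at h
      simp at h
  rw [this]

theorem pv_bridge (pose_dict : List (Int × List (List Int)))
    (s : List (Int × List (List Int))) (R : PySem.Set Int) (fuel : Nat)
    (hsuf : ∃ pre, (PySem.Dict.ofList pose_dict).items = pre ++ s ∧
      ∀ p ∈ pre, PySem.Set.contains R p.1 = true)
    (hfuel : (pvRem s R).length ≤ fuel) :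
    pvCleanLoopA fuel (PySem.Dict.mk (pvRem s R)) =
      pvCleanLoopB (PySem.Dict.ofList pose_dict)
        (pvIndexOf (PySem.Dict.ofList pose_dict).items)
        (pvPosOf (PySem.Dict.ofList pose_dict).items) s R := by
  induction s generalizing R fuel with
  | nil =>
    show pvCleanLoopA fuel (PySem.Dict.mk []) = []
    cases fuel <;> rfl
  | cons p rest ih =>
    obtain ⟨k, v⟩ := p
    obtain ⟨pre, hpre, hcov⟩ := hsuf
    have hnd : ((PySem.Dict.ofList pose_dict).items.map (fun p => p.1)).Nodup := by
      have := PySem.Dict.nodup_keys_ofList pose_dict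
      simpa [PySem.Dict.keys] using this
    by_cases hk : PySem.Set.contains R k = true
    · -- k was already merged away: both sides skip it
      have hArw : pvRem ((k,v)::rest) R = pvRem rest R := by
        have hkm : k ∈ R := (PySem.Set.contains_iff _ _).1 hk
        simp [pvRem, hkm]
      rw [hArw] at hfuel ⊢
      rw [pvB_unfold, if_pos hk]
      exact ih R fuel ⟨pre ++ [(k,v)], by simpa using hpre,
        by
          intro q hq
          rcases List.mem_append.1 hq with hq | hq
          · exact hcov q hq
          · rcases List.mem_singleton.1 hq with rfl
            exact hk⟩ hfuel
    · -- k is the next seed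
      have hksub : ((k,v) :: rest).Sublist (PySem.Dict.ofList pose_dict).items := by
        rw [hpre]; exact List.sublist_append_right _ _
      have hnds : (k :: rest.map (fun p => p.1)).Nodup := by
        have := pv_sublist_keys_nodup _ _ hnd hksub
        simpa using this
      have hkrest : ∀ q ∈ rest, q.1 ≠ k := by
        intro q hq hqe
        exact (List.nodup_cons.1 hnds).1 (hqe ▸ List.mem_map_of_mem hq)
      have hrem_cons : pvRem ((k,v)::rest) R = (k,v) :: pvRem rest R := by
        have hkm : k ∉ R := fun h => hk ((PySem.Set.contains_iff _ _).2 h)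
        simp [pvRem, hkm]
      have hcontains_eq : ∀ q ∈ rest,
          PySem.Set.contains R q.1 = PySem.Set.contains (PySem.Set.add R k) q.1 := by
        intro q hq
        rw [Bool.eq_iff_iff, PySem.Set.contains_iff, PySem.Set.contains_iff, PySem.Set.mem_add]
        constructor
        · exact Or.inl
        · rintro (h | h)
          · exact h
          · exact absurd h (hkrest q hq)
      have hrem1 : pvRem rest R = pvRem rest (PySem.Set.add R k) := by
        apply List.filter_congr
        intro q hq
        rw [hcontains_eq q hq]
      cases fuel with
      | zero =>
        exfalso
        rw [hrem_cons] at hfuel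
        simp at hfuel
      | succ f =>
        rw [hrem_cons, hrem1]
        -- the A-side remaining tail after the seed
        have hLss : (pvRem rest (PySem.Set.add R k)).Sublist rest := List.filter_sublist
        have hLndL : ((pvRem rest (PySem.Set.add R k)).map (fun p => p.1)).Nodup :=
          pv_sublist_keys_nodup _ _ hnd (hLss.trans ((List.sublist_cons_self _ _).trans hksub))
        have hLk : ∀ q ∈ pvRem rest (PySem.Set.add R k), q.1 ≠ k :=
          fun q hq => hkrest q (hLss.mem hq)
        rw [pvA_step f k v _ hLk hLndL]
        rw [pvB_unfold, if_neg hk]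
        simp only []
        rw [pv_cand (PySem.Dict.ofList pose_dict).items pre rest k v R hnd hpre hcov]
        rw [pv_stepB]
        simp only []
        -- identify the hit lists on the two sides
        have hhits : (pvRem rest (PySem.Set.add R k)).filter (pvHit (PySem.List.pyGetD v 0 []))
            = rest.filter (fun q => !PySem.Set.contains (PySem.Set.add R k) q.1
                && pvHit (PySem.List.pyGetD v 0 []) q) := by
          unfold pvRem
          rw [List.filter_filter]
          apply List.filter_congr
          intro q _
          rw [Bool.and_comm]
        have hflat0 : ((rest.filter (fun q => !PySem.Set.contains (PySem.Set.add R k) q.1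
              && pvHit (PySem.List.pyGetD v 0 []) q)).map (fun p => p.1)).flatMap
                (fun k2 => PySem.List.pyGetD ((PySem.Dict.ofList pose_dict).getD k2 []) 0 [])
            = (rest.filter (fun q => !PySem.Set.contains (PySem.Set.add R k) q.1
                && pvHit (PySem.List.pyGetD v 0 []) q)).flatMap pvG0 := by
          rw [List.flatMap_map]
          apply List.flatMap_congr
          intro q hq
          have hqi : q ∈ (PySem.Dict.ofList pose_dict).items := by
            apply hksub.mem
            exact List.mem_cons_of_mem _ ((List.filter_sublist).mem hq)
          have : (PySem.Dict.ofList pose_dict).getD q.1 [] = q.2 := by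
            apply PySem.Dict.getD_of_mem_items _ (by exact hqi)
            exact PySem.Dict.nodup_keys_ofList pose_dict
          rw [this, pvG0]
        have hflat1 : ((rest.filter (fun q => !PySem.Set.contains (PySem.Set.add R k) q.1
              && pvHit (PySem.List.pyGetD v 0 []) q)).map (fun p => p.1)).flatMap
                (fun k2 => PySem.List.pyGetD ((PySem.Dict.ofList pose_dict).getD k2 []) 1 [])
            = (rest.filter (fun q => !PySem.Set.contains (PySem.Set.add R k) q.1
                && pvHit (PySem.List.pyGetD v 0 []) q)).flatMap pvG1 := by
          rw [List.flatMap_map]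
          apply List.flatMap_congr
          intro q hq
          have hqi : q ∈ (PySem.Dict.ofList pose_dict).items := by
            apply hksub.mem
            exact List.mem_cons_of_mem _ ((List.filter_sublist).mem hq)
          have : (PySem.Dict.ofList pose_dict).getD q.1 [] = q.2 := by
            apply PySem.Dict.getD_of_mem_items _ (by exact hqi)
            exact PySem.Dict.nodup_keys_ofList pose_dict
          rw [this, pvG1]
        rw [hhits, hflat0, hflat1]
        congr 1
        -- the recursive call
        have hrem2 : pvRem rest (PySem.Set.update (PySem.Set.add R k)
              ((rest.filter (fun q => !PySem.Set.contains (PySem.Set.add R k) q.1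
                && pvHit (PySem.List.pyGetD v 0 []) q)).map (fun p => p.1)))
            = (pvRem rest (PySem.Set.add R k)).filter
                (fun q => !pvHit (PySem.List.pyGetD v 0 []) q) := by
          unfold pvRem
          rw [List.filter_filter]
          apply List.filter_congr
          intro q hq
          have hqitems : q ∈ (PySem.Dict.ofList pose_dict).items :=
            hksub.mem (List.mem_cons_of_mem _ hq)
          have hcontains2 : PySem.Set.contains (PySem.Set.update (PySem.Set.add R k)
                ((rest.filter (fun q => !PySem.Set.contains (PySem.Set.add R k) q.1
                  && pvHit (PySem.List.pyGetD v 0 []) q)).map (fun p => p.1))) q.1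
              = (PySem.Set.contains (PySem.Set.add R k) q.1 || pvHit (PySem.List.pyGetD v 0 []) q) := by
            rw [Bool.eq_iff_iff, PySem.Set.contains_iff, PySem.Set.mem_update, Bool.or_eq_true]
            constructor
            · rintro (h | h)
              · exact Or.inl ((PySem.Set.contains_iff _ _).2 h)
              · rw [List.mem_map] at h
                obtain ⟨p, hp, hpe⟩ := h
                rw [List.mem_filter, Bool.and_eq_true] at hp
                have hpitems : p ∈ (PySem.Dict.ofList pose_dict).items :=
                  hksub.mem (List.mem_cons_of_mem _ hp.1)
                have := List.inj_on_of_nodup_map hnd hpitems hqitems hpe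
                rw [← this]
                exact Or.inr hp.2.2
            · rintro (h | h)
              · exact Or.inl ((PySem.Set.contains_iff _ _).1 h)
              · by_cases h1 : PySem.Set.contains (PySem.Set.add R k) q.1 = true
                · exact Or.inl ((PySem.Set.contains_iff _ _).1 h1)
                · right
                  rw [List.mem_map]
                  refine ⟨q, List.mem_filter.2 ⟨hq, ?_⟩, rfl⟩
                  rw [Bool.and_eq_true]
                  refine ⟨?_, h⟩
                  have h1' : PySem.Set.contains (PySem.Set.add R k) q.1 = false := by
                    simpa using h1
                  rw [h1']
                  rfl
          rw [hcontains2]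
          cases PySem.Set.contains (PySem.Set.add R k) q.1 <;>
            cases pvHit (PySem.List.pyGetD v 0 []) q <;> rfl
        rw [← hrem2]
        apply ih
        · refine ⟨pre ++ [(k,v)], by simpa using hpre, ?_⟩
          intro q hq
          rcases List.mem_append.1 hq with hq | hq
          · rw [PySem.Set.contains_iff, PySem.Set.mem_update]
            left
            rw [PySem.Set.mem_add]
            exact Or.inl ((PySem.Set.contains_iff _ _).1 (hcov q hq))
          · rcases List.mem_singleton.1 hq with rfl
            rw [PySem.Set.contains_iff, PySem.Set.mem_update]
            left
            rw [PySem.Set.mem_add]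
            exact Or.inr rfl
        · rw [hrem2]
          have h1 : ((pvRem rest (PySem.Set.add R k)).filter
              (fun q => !pvHit (PySem.List.pyGetD v 0 []) q)).length
              ≤ (pvRem rest (PySem.Set.add R k)).length := List.length_filter_le _ _
          rw [hrem_cons, hrem1] at hfuel
          simp only [List.length_cons] at hfuel
          omega

theorem pv_update_len (ps : List (Int × List (List Int))) (d : PySem.Dict Int (List (List Int))) :
    (d.update ps).items.length ≤ d.items.length + ps.length := by
  induction ps generalizing d with
  | nil => simp [PySem.Dict.update]
  | cons p tl ih =>
    have h1 := ih (d.insert p.1 p.2)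
    have h2 : (d.insert p.1 p.2).items.length ≤ d.items.length + 1 := by
      rw [PySem.Dict.items_insert]
      split
      · simp
      · simp
    calc (d.update (p :: tl)).items.length
        = ((d.insert p.1 p.2).update tl).items.length := rfl
      _ ≤ (d.insert p.1 p.2).items.length + tl.length := h1
      _ ≤ d.items.length + 1 + tl.length := by omega
      _ = d.items.length + (p :: tl).length := by simp; omega

-- ===== VERDICT (by name: the statement is the Claim_ definition above) =====
theorem clean_merged_pose_spec : Claim_equal_clean_merged_pose := by
  intro pose_dict _hdom _hpre
  unfold Spec_clean_merged_pose
  show pvCleanLoopA pose_dict.length (PySem.Dict.ofList pose_dict) = _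
  have hrem : pvRem (PySem.Dict.ofList pose_dict).items PySem.Set.empty
      = (PySem.Dict.ofList pose_dict).items := by
    apply List.filter_eq_self.2
    intro q _
    rfl
  have hmk : PySem.Dict.mk (pvRem (PySem.Dict.ofList pose_dict).items PySem.Set.empty)
      = PySem.Dict.ofList pose_dict := by
    apply PySem.Dict.ext
    rw [hrem]
  have hfuel : (pvRem (PySem.Dict.ofList pose_dict).items PySem.Set.empty).length
      ≤ pose_dict.length := by
    rw [hrem]
    have := pv_update_len pose_dict PySem.Dict.empty
    simpa [PySem.Dict.ofList, PySem.Dict.empty] using this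
  have := pv_bridge pose_dict (PySem.Dict.ofList pose_dict).items PySem.Set.empty
    pose_dict.length ⟨[], by simp, by simp⟩ hfuel
  rw [hmk] at this
  exact this
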